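-- pv_equiv track=rewrite | github.com/openhealthcare/rbhl | rbhl/views.py | get_diagnosis_breakdown
-- ===== SOURCE A (Python) =====
-- from collections import defaultdict
--
-- def get_diagnosis_breakdown(rows):
--     by_diagnosis = defaultdict(int)
--     other_less_than_3 = 0
--     for row in rows:
--         for diagnosis in row["Diagnosis"]:
--             by_diagnosis[diagnosis] += 1
--
--     for diagnosis, amount in list(by_diagnosis.items()):
--         if amount < 3:
--             other_less_than_3 += amount
--             by_diagnosis.pop(diagnosis)
--
--     result = dict(sorted(by_diagnosis.items(), key=lambda x: -x[1]))
--     if other_less_than_3: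
--         result["Other (<3)"] = other_less_than_3
--     return result
-- ===== SOURCE B (Python) =====
-- from collections import Counter
--
-- def get_diagnosis_breakdown(rows):
--     counts = Counter(d for row in rows for d in row["Diagnosis"])
--     buckets = {}
--     for diagnosis, amount in counts.items():
--         buckets.setdefault(amount, []).append(diagnosis)
--     result = {}
--     for amount in range(max(buckets, default=0), 2, -1):
--         for diagnosis in buckets.get(amount, []):
--             result[diagnosis] = amount
--     other = 1 * len(buckets.get(1, [])) + 2 * len(buckets.get(2, []))
--     if other:
--         result["Other (<3)"] = other
--     return result
-- ===== Notes on version B (the rewrite author's own statement) =====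
-- stated objective: alternative
-- what changed: B never comparison-sorts: it groups diagnoses into count-buckets (count -> list of diagnoses) and emits kept items by counting down from the maximal count (bucket/counting-sort), computing 'other' in closed form from the sizes of buckets 1 and 2, instead of A's mutate-while-iterating pop loop followed by sorted() on the survivors.
import Mathlib
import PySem

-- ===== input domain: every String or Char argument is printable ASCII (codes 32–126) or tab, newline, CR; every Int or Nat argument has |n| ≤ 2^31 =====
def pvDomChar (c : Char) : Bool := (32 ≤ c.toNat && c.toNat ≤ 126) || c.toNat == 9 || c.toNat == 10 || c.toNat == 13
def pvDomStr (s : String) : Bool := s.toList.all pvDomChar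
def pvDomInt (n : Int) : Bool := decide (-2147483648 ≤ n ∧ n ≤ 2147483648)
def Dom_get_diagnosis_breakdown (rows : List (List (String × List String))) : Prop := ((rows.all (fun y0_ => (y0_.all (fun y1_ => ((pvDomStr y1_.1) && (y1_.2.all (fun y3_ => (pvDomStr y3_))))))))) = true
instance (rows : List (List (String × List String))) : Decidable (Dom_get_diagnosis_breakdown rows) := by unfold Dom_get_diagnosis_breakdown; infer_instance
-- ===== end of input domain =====

-- B replaces A's comparison sort entirely: it groups diagnoses into count-buckets and emits them by
-- counting down from the maximal count (a counting-sort / bucket strategy); same return value.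

-- row["Diagnosis"]: first-match dict lookup; Python raises KeyError when the key is absent —
-- those inputs are excluded by Pre_, the [] default is never reached inside Pre_.
def pvDiagLookup (row : List (String × List String)) : List String :=
  match row.find? (fun p => p.1 == "Diagnosis") with
  | some p => p.2
  | none => []

-- ===== PORT A =====
def get_diagnosis_breakdown (rows : List (List (String × List String))) : List (String × Int) :=
  let by_diagnosis : PySem.Dict String Int :=
    rows.foldl (fun d row =>
      (pvDiagLookup row).foldl (fun d diagnosis => d.modify diagnosis 0 (· + 1)) d)
      PySem.Dict.empty
  let st :=
    by_diagnosis.items.foldl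
      (fun (s : PySem.Dict String Int × Int) p =>
        if p.2 < 3 then (s.1.erase p.1, s.2 + p.2) else s)
      (by_diagnosis, 0)
  let result := PySem.Dict.ofList (PySem.List.sorted st.1.items (fun x => -x.2) false)
  let result := if st.2 ≠ 0 then result.insert "Other (<3)" st.2 else result
  result.items

-- ===== PORT B =====
def get_diagnosis_breakdown_alt (rows : List (List (String × List String))) : List (String × Int) :=
  let counts : PySem.Dict String Int :=
    PySem.Dict.counter (rows.flatMap (fun row => pvDiagLookup row))
  -- buckets.setdefault(amount, []).append(diagnosis)  ==  buckets[amount] = buckets.get(amount, []) + [diagnosis]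
  let buckets : PySem.Dict Int (List String) :=
    counts.items.foldl (fun b p => b.modify p.2 [] (· ++ [p.1])) PySem.Dict.empty
  let maxc : Int := PySem.List.maxD buckets.keys (fun x => x) 0   -- max(buckets, default=0)
  let result : PySem.Dict String Int :=
    (PySem.List.pyRange maxc 2 (-1)).foldl
      (fun r amount =>
        (buckets.getD amount []).foldl (fun r diagnosis => r.insert diagnosis amount) r)
      PySem.Dict.empty
  let other : Int := 1 * (buckets.getD 1 []).length + 2 * (buckets.getD 2 []).length
  let result := if other ≠ 0 then result.insert "Other (<3)" other else result
  result.items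

-- ===== PRECONDITION & SPEC =====
-- Pre_ excludes exactly the inputs where Python A raises KeyError: a row without a "Diagnosis" key.
def Pre_get_diagnosis_breakdown (rows : List (List (String × List String))) : Prop :=
  (rows.all (fun row => row.any (fun p => p.1 == "Diagnosis"))) = true
instance (rows : List (List (String × List String))) : Decidable (Pre_get_diagnosis_breakdown rows) := by unfold Pre_get_diagnosis_breakdown; infer_instance

def pvWitness_get_diagnosis_breakdown : (List (List (String × List String))) :=
  [[("Diagnosis", ["asthma", "asthma", "asthma", "cough"])], [("Diagnosis", ["cough"])]]

def Spec_get_diagnosis_breakdown (rows : List (List (String × List String))) (out : List (String × Int)) : Prop := out = get_diagnosis_breakdown_alt rows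
instance (rows : List (List (String × List String))) (out : List (String × Int)) : Decidable (Spec_get_diagnosis_breakdown rows out) := by unfold Spec_get_diagnosis_breakdown; infer_instance

-- ===== CLAIM (what is proved, stated in full; the proofs are below) =====
def Claim_equal_get_diagnosis_breakdown : Prop := ∀ (rows : List (List (String × List String))), Dom_get_diagnosis_breakdown rows → Pre_get_diagnosis_breakdown rows → Spec_get_diagnosis_breakdown rows (get_diagnosis_breakdown rows)

-- ===== LEMMAS AND PROOFS =====

-- A's counting loop builds Counter(rows.flatMap lookup)
theorem pv_countA (rows : List (List (String × List String))) :
    rows.foldl (fun d row =>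
        (pvDiagLookup row).foldl (fun d diagnosis => d.modify diagnosis 0 (· + 1)) d)
      PySem.Dict.empty
    = PySem.Dict.counter (rows.flatMap (fun row => pvDiagLookup row)) := by
  rw [PySem.Dict.counter_eq_foldl, List.foldl_flatMap]

-- A's pop loop, other-accumulator component split off
theorem pv_loopA (l : List (String × Int)) (d : PySem.Dict String Int) (o : Int) :
    l.foldl (fun (s : PySem.Dict String Int × Int) p =>
        if p.2 < 3 then (s.1.erase p.1, s.2 + p.2) else s) (d, o)
    = (l.foldl (fun d p => if p.2 < 3 then d.erase p.1 else d) d,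
       o + ((l.filter (fun p => decide (p.2 < 3))).map (·.2)).sum) := by
  induction l generalizing d o with
  | nil => simp
  | cons p t ih =>
    by_cases h : p.2 < 3 <;> simp [h, ih] <;> ring

-- the erase loop over a snapshot of the items is a filter (keys need not be distinct yet)
theorem pv_eraseLoop (l L : List (String × Int)) :
    l.foldl (fun (d : PySem.Dict String Int) p => if p.2 < 3 then d.erase p.1 else d)
      (PySem.Dict.mk L)
    = PySem.Dict.mk (L.filter (fun q =>
        !(((l.filter (fun p => decide (p.2 < 3))).map (·.1)).contains q.1))) := by
  induction l generalizing L with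
  | nil => simp
  | cons p t ih =>
    by_cases h : p.2 < 3
    · have he : (PySem.Dict.mk L).erase p.1
          = PySem.Dict.mk (L.filter (fun q => !(q.1 == p.1))) := rfl
      simp only [List.foldl_cons, if_pos h]
      rw [he, ih, List.filter_filter]
      congr 1
      apply List.filter_congr
      intro q _
      cases hq2 : (q.1 == p.1) <;>
        cases hq : ((List.map (fun x => x.1) (List.filter (fun p => decide (p.2 < 3)) t)).contains q.1) <;>
        simp_all [List.contains_eq_mem]
    · simp only [List.foldl_cons, if_neg h, ih]
      simp [h]

-- with distinct keys, the erased dict is exactly the kept (count ≥ 3) items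
theorem pv_keep (l : List (String × Int)) (hnd : (l.map (·.1)).Nodup) :
    l.foldl (fun (d : PySem.Dict String Int) p => if p.2 < 3 then d.erase p.1 else d)
      (PySem.Dict.mk l)
    = PySem.Dict.mk (l.filter (fun q => !decide (q.2 < 3))) := by
  rw [pv_eraseLoop]
  congr 1
  apply List.filter_congr
  intro q hq
  congr 1
  cases h : decide (q.2 < 3) with
  | true =>
    simp only [List.contains_eq_mem, List.mem_map, decide_eq_true_eq]
    exact ⟨q, List.mem_filter.mpr ⟨hq, h⟩, rfl⟩
  | false =>
    simp only [List.contains_eq_mem, List.mem_map, decide_eq_false_iff_not]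
    rintro ⟨p, hp, hpq⟩
    have hpl := (List.mem_filter.mp hp).1
    have := List.inj_on_of_nodup_map hnd hpl hq hpq
    subst this
    have := (List.mem_filter.mp hp).2
    rw [h] at this
    exact Bool.false_ne_true this

-- inserting an element that fails the filter does not change the filtered list
theorem pv_filter_insertBy_neg {α : Type} (lt : α → α → Bool) (p : α → Bool) (x : α)
    (hx : p x = false) (ys : List α) :
    (PySem.List.insertBy lt x ys).filter p = ys.filter p := by
  induction ys with
  | nil => simp [PySem.List.insertBy, hx]
  | cons y t ih =>
    by_cases h : lt x y
    · simp [PySem.List.insertBy, h, hx]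
    · cases hy : p y <;> simp [PySem.List.insertBy, h, hy, ih]

-- on a key-sorted list, insertBy commutes with any filter that keeps the inserted element
theorem pv_filter_insertBy_pos {α : Type} (key : α → Int) (p : α → Bool) (x : α)
    (hx : p x = true) (ys : List α)
    (hs : ys.Pairwise (fun a b => key a ≤ key b)) :
    (PySem.List.insertBy (fun a b => decide (key a < key b)) x ys).filter p
    = PySem.List.insertBy (fun a b => decide (key a < key b)) x (ys.filter p) := by
  induction ys with
  | nil => simp [PySem.List.insertBy, hx]
  | cons y t ih =>
    have hs' : t.Pairwise (fun a b => key a ≤ key b) := (List.pairwise_cons.mp hs).2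
    have hy_le : ∀ z ∈ t, key y ≤ key z := (List.pairwise_cons.mp hs).1
    by_cases h : key x < key y
    · cases hy : p y
      · have hlhs : (PySem.List.insertBy (fun a b => decide (key a < key b)) x (y :: t)).filter p
            = x :: t.filter p := by
          simp [PySem.List.insertBy, h, hx, hy]
        have hrhs : (y :: t).filter p = t.filter p := by simp [hy]
        rw [hlhs, hrhs]
        cases hft : t.filter p with
        | nil => simp [PySem.List.insertBy]
        | cons z zs =>
          have hz : z ∈ t := List.mem_of_mem_filter (hft ▸ List.mem_cons_self ..)
          have hlt : key x < key z := lt_of_lt_of_le h (hy_le z hz)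
          simp [PySem.List.insertBy, hlt]
      · simp [PySem.List.insertBy, h, hx, hy]
    · cases hy : p y <;>
        simp [PySem.List.insertBy, h, hy, ih hs']

theorem pv_sorted_append_singleton {α : Type} (key : α → Int) (xs : List α) (x : α) :
    PySem.List.sorted (xs ++ [x]) key false
    = PySem.List.insertBy (fun a b => decide (key a < key b)) x
        (PySem.List.sorted xs key false) := by
  simp [PySem.List.sorted, List.foldl_append]

-- a stable sort commutes with filtering
theorem pv_filter_sorted {α : Type} (key : α → Int) (p : α → Bool) (xs : List α) :
    (PySem.List.sorted xs key false).filter p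
    = PySem.List.sorted (xs.filter p) key false := by
  induction xs using List.reverseRecOn with
  | nil => rfl
  | append_singleton xs x ih =>
    rw [pv_sorted_append_singleton, List.filter_append]
    cases hx : p x
    · rw [pv_filter_insertBy_neg _ _ _ hx, ih]
      simp [hx]
    · rw [pv_filter_insertBy_pos key p x hx _ (PySem.List.sorted_pairwise xs key), ih]
      simp [hx, pv_sorted_append_singleton]

-- keeping (count ≥ 3) is the complement of the (count < 3) test
theorem pv_filter_keep (l : List (String × Int)) :
    l.filter (fun q => !decide (q.2 < 3)) = l.filter (fun q => decide (3 ≤ q.2)) := by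
  apply List.filter_congr
  intro q _
  simp only [← decide_not, decide_eq_decide]
  omega

-- B's grouping loop: bucket c holds the first components of the pairs whose count is c, in order
theorem pv_buckets (l : List (String × Int)) (c : Int) :
    (l.foldl (fun (b : PySem.Dict Int (List String)) p => b.modify p.2 [] (· ++ [p.1]))
      PySem.Dict.empty).getD c []
    = (l.filter (fun p => p.2 == c)).map (·.1) := by
  have h := PySem.Dict.getD_foldl_modify_append (l.map (fun p => (p.2, p.1)))
    PySem.Dict.empty c
  rw [List.foldl_map] at h
  simpa [List.filter_map, Function.comp] using h

-- every count occurring in l is a key of the bucket dict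
theorem pv_mem_bucket_keys (l : List (String × Int)) (p : String × Int) (hp : p ∈ l) :
    p.2 ∈ (l.foldl (fun (b : PySem.Dict Int (List String)) p => b.modify p.2 [] (· ++ [p.1]))
      PySem.Dict.empty).keys := by
  rw [PySem.Dict.keys_foldl_modify_key l (fun p => p.2) [] (fun _ p => (· ++ [p.1]))]
  rw [PySem.Set.mem_update]
  exact Or.inr (List.mem_map_of_mem hp)

-- on a descending-count list, the band 3 ≤ count ≤ m splits off the count = m block (3 ≤ m)
theorem pv_split (s : List (String × Int)) (m : Int) (hm : 3 ≤ m)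
    (hs : s.Pairwise (fun a b => -a.2 ≤ -b.2)) :
    s.filter (fun p => decide (3 ≤ p.2) && decide (p.2 ≤ m))
    = s.filter (fun p => p.2 == m)
      ++ s.filter (fun p => decide (3 ≤ p.2) && decide (p.2 ≤ m - 1)) := by
  induction s with
  | nil => simp
  | cons x t ih =>
    have hx_ge : ∀ y ∈ t, y.2 ≤ x.2 := by
      intro y hy
      have := (List.pairwise_cons.mp hs).1 y hy
      omega
    have ih' := ih (List.pairwise_cons.mp hs).2
    by_cases hxm : x.2 = m
    · simp only [List.filter_cons]
      have h1 : (decide (3 ≤ x.2) && decide (x.2 ≤ m)) = true := by simp; omega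
      have h2 : (x.2 == m) = true := by simp [hxm]
      have h3 : (decide (3 ≤ x.2) && decide (x.2 ≤ m - 1)) = false := by simp; omega
      simp only [h1, h2, h3, if_true, if_false, cond_true, cond_false]
      simpa using ih'
    · by_cases hkeep : 3 ≤ x.2 ∧ x.2 ≤ m
      · -- x kept, x.2 < m, so no later element has count m
        have hxlt : x.2 ≤ m - 1 := by omega
        have hnil : t.filter (fun p => p.2 == m) = [] := by
          rw [List.filter_eq_nil_iff]
          intro y hy
          have := hx_ge y hy
          simp; omega
        simp only [List.filter_cons]
        have h1 : (decide (3 ≤ x.2) && decide (x.2 ≤ m)) = true := by simp; omega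
        have h2 : (x.2 == m) = false := by simp [hxm]
        have h3 : (decide (3 ≤ x.2) && decide (x.2 ≤ m - 1)) = true := by simp; omega
        simp only [h1, h2, h3, if_true, if_false, cond_true, cond_false]
        rw [ih', hnil]
        simp [hnil]
      · simp only [List.filter_cons]
        have h1 : (decide (3 ≤ x.2) && decide (x.2 ≤ m)) = false := by simp; omega
        have h2 : (x.2 == m) = false := by simp [hxm]
        have h3 : (decide (3 ≤ x.2) && decide (x.2 ≤ m - 1)) = false := by simp; omega
        simp only [h1, h2, h3, if_false, cond_false]
        exact ih'
-- the count = c block of the stable sort is the count = c block of the input, in input order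
theorem pv_constfilter (l : List (String × Int)) (c : Int) :
    (PySem.List.sorted l (fun x => -x.2) false).filter (fun p => p.2 == c)
    = l.filter (fun p => p.2 == c) := by
  rw [pv_filter_sorted]
  apply PySem.List.sorted_eq_self_of_pairwise
  apply List.pairwise_of_forall_mem_list
  intro a ha b hb
  have ha2 : a.2 = c := by simpa using (List.mem_filter.mp ha).2
  have hb2 : b.2 = c := by simpa using (List.mem_filter.mp hb).2
  simp [ha2, hb2]

-- the countdown emission equals the 3 ≤ count ≤ m band of the stable descending sort
theorem pv_emit_aux (l : List (String × Int)) (n : Nat) :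
    ∀ m : Int, m = 2 + (n : Int) →
    (PySem.List.pyRange m 2 (-1)).flatMap (fun c => l.filter (fun p => p.2 == c))
    = (PySem.List.sorted l (fun x => -x.2) false).filter
        (fun p => decide (3 ≤ p.2) && decide (p.2 ≤ m)) := by
  induction n with
  | zero =>
    intro m hm
    rw [PySem.List.pyRange_neg_one_eq_nil (by omega)]
    rw [eq_comm, List.flatMap_nil, List.filter_eq_nil_iff]
    intro p _
    simp; omega
  | succ k ih =>
    intro m hm
    rw [PySem.List.pyRange_neg_one_cons (by omega)]
    rw [List.flatMap_cons, ih (m - 1) (by push_cast; omega)]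
    rw [pv_split _ m (by omega) (PySem.List.sorted_pairwise l (fun x => -x.2))]
    rw [pv_constfilter]

theorem pv_emit (l : List (String × Int)) (m : Int) :
    (PySem.List.pyRange m 2 (-1)).flatMap (fun c => l.filter (fun p => p.2 == c))
    = (PySem.List.sorted l (fun x => -x.2) false).filter
        (fun p => decide (3 ≤ p.2) && decide (p.2 ≤ m)) := by
  by_cases hm : m ≤ 2
  · rw [PySem.List.pyRange_neg_one_eq_nil hm]
    rw [eq_comm, List.flatMap_nil, List.filter_eq_nil_iff]
    intro p _
    simp; omega
  · exact pv_emit_aux l (m - 2).toNat m (by omega)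

-- the < 3 mass is one per count-1 diagnosis plus two per count-2 diagnosis (counts are ≥ 1)
theorem pv_othersum (l : List (String × Int)) (hpos : ∀ p ∈ l, 1 ≤ p.2) :
    ((l.filter (fun p => decide (p.2 < 3))).map (·.2)).sum
    = 1 * ((l.filter (fun p => p.2 == (1:Int))).length : Int)
      + 2 * ((l.filter (fun p => p.2 == (2:Int))).length : Int) := by
  induction l with
  | nil => simp
  | cons p t ih =>
    have hp1 : 1 ≤ p.2 := hpos p (List.mem_cons_self ..)
    have ih' := ih (fun q hq => hpos q (List.mem_cons_of_mem _ hq))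
    by_cases h1 : p.2 = 1
    · simp [List.filter_cons, h1, ih']; ring
    · by_cases h2 : p.2 = 2
      · simp [List.filter_cons, h2, ih']; ring
      · have h3 : ¬ p.2 < 3 := by omega
        simp [List.filter_cons, h1, h2, h3, ih']

-- ===== VERDICT (by name: the statement is the Claim_ definition above) =====
theorem get_diagnosis_breakdown_spec : Claim_equal_get_diagnosis_breakdown := by
  intro rows _ _
  simp only [Spec_get_diagnosis_breakdown, get_diagnosis_breakdown, get_diagnosis_breakdown_alt]
  rw [pv_countA]
  set c := PySem.Dict.counter (rows.flatMap (fun row => pvDiagLookup row)) with hc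
  have hnod : (List.map (fun x => x.1) c.items).Nodup := PySem.Dict.nodup_keys_counter _
  set l := c.items with hl
  -- counts are ≥ 1
  have hpos : ∀ p ∈ l, 1 ≤ p.2 := by
    intro p hp
    rw [hl, hc, PySem.Dict.items_counter] at hp
    obtain ⟨k, hk, rfl⟩ := List.mem_map.mp hp
    have : k ∈ rows.flatMap (fun row => pvDiagLookup row) :=
      (PySem.Set.mem_ofList _ _).mp hk
    have := List.count_pos_iff.mpr this
    simp only
    omega
  -- A side: the surviving dict is exactly the kept (count ≥ 3) pairs
  rw [pv_loopA]
  have hkeep : l.foldl (fun d p => if p.2 < 3 then d.erase p.1 else d) c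
      = PySem.Dict.mk (l.filter (fun q => decide (3 ≤ q.2))) := by
    rw [show (l.foldl (fun d p => if p.2 < 3 then d.erase p.1 else d) c)
        = l.foldl (fun d p => if p.2 < 3 then d.erase p.1 else d) (PySem.Dict.mk l)
        from rfl, pv_keep l hnod, pv_filter_keep]
  rw [hkeep]
  dsimp only
  -- B side: rewrite buckets, max, emission
  set B := l.foldl (fun (b : PySem.Dict Int (List String)) p => b.modify p.2 [] (· ++ [p.1]))
      PySem.Dict.empty with hB
  set maxc := PySem.List.maxD B.keys (fun x => x) 0 with hmaxc
  have hmax : ∀ p ∈ l, p.2 ≤ maxc := by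
    intro p hp
    have hk := pv_mem_bucket_keys l p hp
    rw [← hB] at hk
    rw [hmaxc, PySem.List.maxD]
    cases hm : PySem.List.max? B.keys (fun x => x) with
    | none =>
      rw [(PySem.List.max?_eq_none_iff _ _).mp hm] at hk
      exact absurd hk (List.not_mem_nil)
    | some m =>
      simpa using PySem.List.max?_isMax hm p.2 hk
  -- the emission fold inserts exactly the kept pairs of the descending sort, in order
  have hinner : ∀ (r : PySem.Dict String Int) (amount : Int),
      (B.getD amount []).foldl (fun r diagnosis => r.insert diagnosis amount) r
      = (l.filter (fun p => p.2 == amount)).foldl (fun r p => r.insert p.1 p.2) r := by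
    intro r amount
    rw [hB, pv_buckets, List.foldl_map]
    apply PySem.List.foldl_congr_mem
    intro acc x hx
    have : x.2 = amount := by simpa using (List.mem_filter.mp hx).2
    rw [this]
  have hemit : (PySem.List.pyRange maxc 2 (-1)).foldl
      (fun r amount => (B.getD amount []).foldl (fun r diagnosis => r.insert diagnosis amount) r)
      PySem.Dict.empty
      = ((PySem.List.pyRange maxc 2 (-1)).flatMap (fun c => l.filter (fun p => p.2 == c))).foldl
          (fun r p => r.insert p.1 p.2) PySem.Dict.empty := by
    rw [List.foldl_flatMap]
    apply PySem.List.foldl_congr_mem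
    intro acc x _
    exact hinner acc x
  -- the emitted list is the ≥3 part of the stable sort, i.e. the sort of the ≥3 part
  have hband : ((PySem.List.pyRange maxc 2 (-1)).flatMap (fun c => l.filter (fun p => p.2 == c)))
      = PySem.List.sorted (l.filter (fun q => decide (3 ≤ q.2))) (fun x => -x.2) false := by
    rw [pv_emit, ← pv_filter_sorted]
    apply List.filter_congr
    intro p hp
    have hpl : p ∈ l := (PySem.List.mem_sorted ..).mp hp
    have := hmax p hpl
    simp only [Bool.and_eq_left_iff_imp]
    intro
    simp; omega
  -- name the kept sorted list and show both result dicts agree before the Other entry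
  set K := PySem.List.sorted (l.filter (fun q => decide (3 ≤ q.2))) (fun x => -x.2) false with hK
  have hKnod : (K.map (fun p => p.1)).Nodup := by
    have hperm : K.Perm (l.filter (fun q => decide (3 ≤ q.2))) := PySem.List.sorted_perm ..
    have hsub : ((l.filter (fun q => decide (3 ≤ q.2))).map (fun p => p.1)).Nodup :=
      ((List.filter_sublist (l := l)).map (fun p => p.1)).nodup hnod
    exact ((hperm.map (fun p => p.1)).nodup_iff).mpr hsub
  have hA : (PySem.Dict.ofList K).items = K := by
    show (List.foldl (fun (acc : PySem.Dict String Int) (p : String × Int) => acc.insert p.1 p.2)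
        PySem.Dict.empty _).items = _
    rw [PySem.Dict.items_foldl_insert_fresh K (fun p => p.1) (fun p => p.2) PySem.Dict.empty
      (fun a _ => PySem.Dict.contains_empty _) hKnod]
    simp [PySem.Dict.empty]
  have hBdict : (K.foldl (fun (r : PySem.Dict String Int) p => r.insert p.1 p.2)
      PySem.Dict.empty).items = K := by
    rw [PySem.Dict.items_foldl_insert_fresh K (fun p => p.1) (fun p => p.2) PySem.Dict.empty
      (fun a _ => PySem.Dict.contains_empty _) hKnod]
    simp [PySem.Dict.empty]
  have hdict : PySem.Dict.ofList K
      = (PySem.List.pyRange maxc 2 (-1)).foldl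
          (fun r amount => (B.getD amount []).foldl (fun r diagnosis => r.insert diagnosis amount) r)
          PySem.Dict.empty := by
    apply PySem.Dict.ext
    rw [hA, hemit, hband, hBdict]
  -- the two 'other' accumulators agree
  have hother : (0:Int) + ((l.filter (fun p => decide (p.2 < 3))).map (·.2)).sum
      = 1 * ((B.getD 1 []).length : Int) + 2 * ((B.getD 2 []).length : Int) := by
    rw [hB, pv_buckets, pv_buckets]
    simp only [List.length_map, zero_add]
    exact pv_othersum l hpos
  rw [hdict, ← hother]
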